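-- pv_equiv track=rewrite | github.com/Alaedindouak/Python_tasks | 54_tasks.py | func_45
-- ===== SOURCE A (Python) =====
-- def func_45(matrix):
--     max_element = 0
--     x = 0
--     y = 0
--
--     for i in range(len(matrix)):
--
--         for j in range(len(matrix[i])):
--
--             if matrix[i][j] > max_element:
--                 max_element = matrix[i][j]
--
--                 x = i
--                 y = j
--
--     matrix[x][y] = 0
--
--     return matrix
-- ===== SOURCE B (Python) =====
-- def func_45(matrix):
--     # pass 1: maximum cell value with the same 0 threshold as the task
--     m = 0
--     for row in matrix:
--         for v in row:
--             if v > m: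
--                 m = v
--     # pass 2: first row-major position of that maximum (default (0, 0))
--     x, y = 0, 0
--     if m > 0:
--         i = 0
--         for row in matrix:
--             if m in row:
--                 x, y = i, row.index(m)
--                 break
--             i += 1
--     matrix[x][y] = 0
--     return matrix
-- ===== Notes on version B (the rewrite author's own statement) =====
-- stated objective: alternative
-- what changed: Replaces A's single index-driven nested scan that threads a (max, x, y) state through every cell with a two-phase decomposition: one pure max-reduction pass over the rows, then a separate first-occurrence search (membership test + row.index) that stops early, followed by the same in-place zeroing.
import Mathlib
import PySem

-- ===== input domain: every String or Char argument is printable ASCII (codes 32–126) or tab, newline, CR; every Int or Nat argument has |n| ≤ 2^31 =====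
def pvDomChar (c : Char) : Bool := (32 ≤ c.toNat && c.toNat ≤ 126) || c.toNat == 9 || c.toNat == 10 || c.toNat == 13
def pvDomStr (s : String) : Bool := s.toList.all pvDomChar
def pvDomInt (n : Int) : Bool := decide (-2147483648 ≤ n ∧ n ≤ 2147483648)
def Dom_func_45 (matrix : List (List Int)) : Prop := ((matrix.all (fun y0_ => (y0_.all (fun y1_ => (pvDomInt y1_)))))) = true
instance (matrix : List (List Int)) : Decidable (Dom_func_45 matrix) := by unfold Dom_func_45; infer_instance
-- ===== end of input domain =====

-- B re-decomposes A into two sequential passes (max-reduction, then first-occurrence search);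
-- both versions mutate the argument in place in Python in the same way, the equivalence below is about the returned value.

-- ===== PORT A =====
-- literal port of A: one nested index loop threading (max_element, x, y), then matrix[x][y] = 0
def func_45 (matrix : List (List Int)) : List (List Int) :=
  let s := (List.range matrix.length).foldl
      (fun (s : Int × Nat × Nat) i =>
        (List.range (matrix.getD i []).length).foldl
          (fun (t : Int × Nat × Nat) j =>
            if (matrix.getD i []).getD j 0 > t.1 then ((matrix.getD i []).getD j 0, i, j) else t)
          s)
      (0, 0, 0)
  matrix.set s.2.1 ((matrix.getD s.2.1 []).set s.2.2 0)

-- ===== PORT B =====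
-- the enumerate/`m in row`/`row.index(m)`/break loop of Source B
def pvFindLoop (m : Int) (rows : List (List Int)) (i : Nat) : Option (Nat × Nat) :=
  match rows with
  | [] => none
  | row :: t => if m ∈ row then some (i, (PySem.List.index? row m).getD 0) else pvFindLoop m t (i + 1)

def func_45_alt (matrix : List (List Int)) : List (List Int) :=
  let m := matrix.foldl (fun m row => row.foldl (fun m v => if v > m then v else m) m) 0
  let p := if m > 0 then (pvFindLoop m matrix 0).getD (0, 0) else ((0 : Nat), (0 : Nat))
  matrix.set p.1 ((matrix.getD p.1 []).set p.2 0)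

-- ===== PRECONDITION & SPEC =====
-- Pre_ excludes exactly the inputs where the final assignment matrix[x][y] = 0 raises IndexError in Python:
-- the empty matrix, and matrices whose first row is empty while no cell is positive (then (x,y) stays (0,0)).
def Pre_func_45 (matrix : List (List Int)) : Prop :=
  matrix ≠ [] ∧ (matrix.getD 0 [] ≠ [] ∨ matrix.any (fun r => r.any (fun v => 0 < v)) = true)
instance (matrix : List (List Int)) : Decidable (Pre_func_45 matrix) := by unfold Pre_func_45; infer_instance
def pvWitness_func_45 : List (List Int) := [[1, 2], [3, 0]]

def Spec_func_45 (matrix : List (List Int)) (out : List (List Int)) : Prop := out = func_45_alt matrix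
instance (matrix : List (List Int)) (out : List (List Int)) : Decidable (Spec_func_45 matrix out) := by unfold Spec_func_45; infer_instance

-- ===== CLAIM (what is proved, stated in full; the proofs are below) =====
def Claim_equal_func_45 : Prop := ∀ (matrix : List (List Int)), Dom_func_45 matrix → Pre_func_45 matrix → Spec_func_45 matrix (func_45 matrix)

-- ===== LEMMAS AND PROOFS =====

-- running maximum of one row / of all rows (the exact folds B uses)
def rmax (m0 : Int) (row : List Int) : Int := row.foldl (fun m v => if v > m then v else m) m0
def mmax (m0 : Int) (rows : List (List Int)) : Int := rows.foldl (fun m row => rmax m row) m0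

theorem le_rmax (m0 : Int) (row : List Int) : m0 ≤ rmax m0 row := by
  induction row generalizing m0 with
  | nil => simp [rmax]
  | cons v t ih =>
    simp only [rmax, List.foldl_cons]
    refine le_trans ?_ (ih (if v > m0 then v else m0))
    split <;> omega

theorem mem_le_rmax (m0 : Int) (row : List Int) (a : Int) (ha : a ∈ row) : a ≤ rmax m0 row := by
  induction row generalizing m0 with
  | nil => simp at ha
  | cons v t ih =>
    simp only [rmax, List.foldl_cons]
    rcases List.mem_cons.mp ha with h | h
    · subst h
      refine le_trans ?_ (le_rmax (if a > m0 then a else m0) t)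
      split <;> omega
    · exact ih _ h

theorem rmax_mem_or (m0 : Int) (row : List Int) : rmax m0 row = m0 ∨ rmax m0 row ∈ row := by
  induction row generalizing m0 with
  | nil => simp [rmax]
  | cons v t ih =>
    simp only [rmax, List.foldl_cons]
    rcases ih (if v > m0 then v else m0) with h | h
    · rw [rmax] at h; rw [h]
      split <;> simp_all
    · right; exact List.mem_cons_of_mem _ h

theorem le_mmax (m0 : Int) (rows : List (List Int)) : m0 ≤ mmax m0 rows := by
  induction rows generalizing m0 with
  | nil => simp [mmax]
  | cons r t ih =>
    simp only [mmax, List.foldl_cons]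
    exact le_trans (le_rmax m0 r) (ih (rmax m0 r))

theorem mem_le_mmax (m0 : Int) (rows : List (List Int)) (r : List Int) (a : Int)
    (hr : r ∈ rows) (ha : a ∈ r) : a ≤ mmax m0 rows := by
  induction rows generalizing m0 with
  | nil => simp at hr
  | cons q t ih =>
    simp only [mmax, List.foldl_cons]
    rcases List.mem_cons.mp hr with h | h
    · subst h
      exact le_trans (mem_le_rmax m0 r a ha) (le_mmax (rmax m0 r) t)
    · exact ih _ h

theorem mmax_mem_or (m0 : Int) (rows : List (List Int)) :
    mmax m0 rows = m0 ∨ ∃ r ∈ rows, mmax m0 rows ∈ r := by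
  induction rows generalizing m0 with
  | nil => simp [mmax]
  | cons r t ih =>
    simp only [mmax, List.foldl_cons]
    rcases ih (rmax m0 r) with h | h
    · rw [mmax] at h; rw [h]
      rcases rmax_mem_or m0 r with h2 | h2
      · left; exact h2
      · right; exact ⟨r, List.mem_cons_self, h2⟩
    · right
      obtain ⟨q, hq, hmem⟩ := h
      exact ⟨q, List.mem_cons_of_mem _ hq, hmem⟩

-- pvFindLoop facts
theorem pvFindLoop_append_of_none (m : Int) (u w : List (List Int)) (i : Nat)
    (h : ∀ r ∈ u, m ∉ r) : pvFindLoop m (u ++ w) i = pvFindLoop m w (i + u.length) := by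
  induction u generalizing i with
  | nil => simp
  | cons r t ih =>
    simp only [List.cons_append, pvFindLoop]
    rw [if_neg (h r List.mem_cons_self)]
    rw [ih _ (fun q hq => h q (List.mem_cons_of_mem _ hq))]
    congr 1
    simp; omega

theorem pvFindLoop_append_left (m : Int) (u w : List (List Int)) (i : Nat)
    (h : ∃ r ∈ u, m ∈ r) : pvFindLoop m (u ++ w) i = pvFindLoop m u i := by
  induction u generalizing i with
  | nil => simp at h
  | cons r t ih =>
    simp only [List.cons_append, pvFindLoop]
    by_cases hm : m ∈ r
    · rw [if_pos hm, if_pos hm]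
    · rw [if_neg hm, if_neg hm]
      refine ih _ ?_
      obtain ⟨q, hq, hmem⟩ := h
      rcases List.mem_cons.mp hq with h1 | h1
      · exact absurd (h1 ▸ hmem) hm
      · exact ⟨q, h1, hmem⟩


-- getD on an appended singleton
theorem getD_app_lt {α : Type} [Inhabited α] (u : List α) (v : α) (j : Nat) (h : j < u.length) (d : α) :
    (u ++ [v]).getD j d = u.getD j d := by
  simp [List.getD_eq_getElem?_getD, List.getElem?_append_left h]

-- inner-loop characterisation of A
theorem innerA_eq (row : List Int) (i : Nat) (s : Int × Nat × Nat) :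
    (List.range row.length).foldl
      (fun (t : Int × Nat × Nat) j => if row.getD j 0 > t.1 then (row.getD j 0, i, j) else t) s
    = if rmax s.1 row > s.1
        then (rmax s.1 row, i, (PySem.List.index? row (rmax s.1 row)).getD 0)
        else s := by
  induction row using List.reverseRecOn with
  | nil => simp [rmax]
  | append_singleton u v ih =>
    have hlen : (u ++ [v]).length = u.length + 1 := by simp
    rw [hlen, List.range_succ, List.foldl_append]
    have hcongr :
        (List.range u.length).foldl
          (fun (t : Int × Nat × Nat) j => if (u ++ [v]).getD j 0 > t.1 then ((u ++ [v]).getD j 0, i, j) else t) s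
        = (List.range u.length).foldl
          (fun (t : Int × Nat × Nat) j => if u.getD j 0 > t.1 then (u.getD j 0, i, j) else t) s := by
      refine PySem.List.foldl_congr_mem _ _ _ _ ?_
      intro acc j hj
      rw [getD_app_lt u v j (List.mem_range.mp hj) 0]
    rw [hcongr, ih]
    simp only [List.foldl_cons, List.foldl_nil]
    have hv : (u ++ [v]).getD u.length 0 = v := by simp
    rw [hv]
    have hM0 : s.1 ≤ rmax s.1 u := le_rmax _ _
    have hfst : (if rmax s.1 u > s.1 then (rmax s.1 u, i, (PySem.List.index? u (rmax s.1 u)).getD 0) else s).1 = rmax s.1 u := by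
      split_ifs with h
      · rfl
      · omega
    have hMv : rmax s.1 (u ++ [v]) = if v > rmax s.1 u then v else rmax s.1 u := by
      simp [rmax, List.foldl_append]
    rw [hfst, hMv]
    by_cases h1 : v > rmax s.1 u
    · rw [if_pos h1, if_pos h1, if_pos (by omega : v > s.1)]
      have hnot : v ∉ u := fun hm => absurd (mem_le_rmax s.1 u v hm) (by omega)
      rw [PySem.List.index?_append_singleton_self u v hnot]
      rfl
    · rw [if_neg h1, if_neg h1]
      by_cases h2 : rmax s.1 u > s.1
      · rw [if_pos h2, if_pos h2]
        have hmem : rmax s.1 u ∈ u := by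
          rcases rmax_mem_or s.1 u with h | h
          · omega
          · exact h
        rw [PySem.List.index?_append_of_mem [v] hmem]
      · rw [if_neg h2, if_neg h2]


-- outer-loop characterisation of A
theorem outerA_eq (rows : List (List Int)) (s : Int × Nat × Nat) :
    (List.range rows.length).foldl
      (fun (t : Int × Nat × Nat) i =>
        (List.range (rows.getD i []).length).foldl
          (fun (t : Int × Nat × Nat) j =>
            if (rows.getD i []).getD j 0 > t.1 then ((rows.getD i []).getD j 0, i, j) else t)
          t) s
    = if mmax s.1 rows > s.1
        then (mmax s.1 rows, (pvFindLoop (mmax s.1 rows) rows 0).getD (0, 0))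
        else s := by
  induction rows using List.reverseRecOn with
  | nil => simp [mmax]
  | append_singleton u row ih =>
    have hlen : (u ++ [row]).length = u.length + 1 := by simp
    rw [hlen, List.range_succ, List.foldl_append]
    have hcongr :
        (List.range u.length).foldl
          (fun (t : Int × Nat × Nat) i =>
            (List.range ((u ++ [row]).getD i []).length).foldl
              (fun (t : Int × Nat × Nat) j =>
                if ((u ++ [row]).getD i []).getD j 0 > t.1 then (((u ++ [row]).getD i []).getD j 0, i, j) else t)
              t) s
        = (List.range u.length).foldl
          (fun (t : Int × Nat × Nat) i =>
            (List.range (u.getD i []).length).foldl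
              (fun (t : Int × Nat × Nat) j =>
                if (u.getD i []).getD j 0 > t.1 then ((u.getD i []).getD j 0, i, j) else t)
              t) s := by
      refine PySem.List.foldl_congr_mem _ _ _ _ ?_
      intro acc i hi
      rw [getD_app_lt u row i (List.mem_range.mp hi) []]
    rw [hcongr, ih]
    simp only [List.foldl_cons, List.foldl_nil]
    have hrow : (u ++ [row]).getD u.length [] = row := by simp
    rw [hrow, innerA_eq]
    have hM0 : s.1 ≤ mmax s.1 u := le_mmax _ _
    have hfst : (if mmax s.1 u > s.1 then (mmax s.1 u, (pvFindLoop (mmax s.1 u) u 0).getD (0, 0)) else s).1 = mmax s.1 u := by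
      split_ifs with h
      · rfl
      · omega
    have hMr : mmax s.1 (u ++ [row]) = rmax (mmax s.1 u) row := by
      simp [mmax, rmax, List.foldl_append]
    rw [hfst, hMr]
    have hle : mmax s.1 u ≤ rmax (mmax s.1 u) row := le_rmax _ _
    by_cases h1 : rmax (mmax s.1 u) row > mmax s.1 u
    · rw [if_pos h1, if_pos (by omega : rmax (mmax s.1 u) row > s.1)]
      have hnone : ∀ r ∈ u, rmax (mmax s.1 u) row ∉ r := by
        intro r hr hmem
        exact absurd (mem_le_mmax s.1 u r _ hr hmem) (by omega)
      rw [pvFindLoop_append_of_none _ _ _ _ hnone]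
      have hmemrow : rmax (mmax s.1 u) row ∈ row := by
        rcases rmax_mem_or (mmax s.1 u) row with h | h
        · omega
        · exact h
      simp only [pvFindLoop, if_pos hmemrow, Nat.zero_add, Option.getD_some]
    · rw [if_neg h1]
      have heq : rmax (mmax s.1 u) row = mmax s.1 u := by omega
      rw [heq]
      by_cases h2 : mmax s.1 u > s.1
      · rw [if_pos h2, if_pos h2]
        have hex : ∃ r ∈ u, mmax s.1 u ∈ r := by
          rcases mmax_mem_or s.1 u with h | h
          · omega
          · exact h
        rw [pvFindLoop_append_left _ _ _ _ hex]
      · rw [if_neg h2, if_neg h2]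

-- ===== VERDICT (by name: the statement is the Claim_ definition above) =====
theorem func_45_spec : Claim_equal_func_45 := by
  intro matrix _ _
  show func_45 matrix = func_45_alt matrix
  have hm : matrix.foldl (fun m row => row.foldl (fun m v => if v > m then v else m) m) 0
      = mmax 0 matrix := rfl
  have h := outerA_eq matrix (0, 0, 0)
  simp only [func_45, func_45_alt, hm, h]
  by_cases hpos : mmax 0 matrix > 0
  · rw [if_pos hpos, if_pos hpos]
  · rw [if_neg hpos, if_neg hpos]
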